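-- pv_equiv track=rewrite | github.com/yerimO/programmers_python | 부족한 금액 계산하기.py | solution
-- ===== SOURCE A (Python) =====
-- def solution(price, money, count):
--     answer = 0
--     a=price
--     for i in range(count):
--         answer+=price
--         price+=a
--     if money>answer:
--         return 0
--     else:
--         return answer-money
-- ===== SOURCE B (Python) =====
-- def solution(price, money, count):
--     n = count if count > 0 else 0
--     total = price * n * (n + 1) // 2
--     return max(total - money, 0)
-- ===== Notes on version B (the rewrite author's own statement) =====
-- stated objective: faster
-- what changed: Replaced the O(count) escalating-price accumulation loop by the closed-form triangular sum price*n*(n+1)//2 and a max() for the clamp.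
import Mathlib
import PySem

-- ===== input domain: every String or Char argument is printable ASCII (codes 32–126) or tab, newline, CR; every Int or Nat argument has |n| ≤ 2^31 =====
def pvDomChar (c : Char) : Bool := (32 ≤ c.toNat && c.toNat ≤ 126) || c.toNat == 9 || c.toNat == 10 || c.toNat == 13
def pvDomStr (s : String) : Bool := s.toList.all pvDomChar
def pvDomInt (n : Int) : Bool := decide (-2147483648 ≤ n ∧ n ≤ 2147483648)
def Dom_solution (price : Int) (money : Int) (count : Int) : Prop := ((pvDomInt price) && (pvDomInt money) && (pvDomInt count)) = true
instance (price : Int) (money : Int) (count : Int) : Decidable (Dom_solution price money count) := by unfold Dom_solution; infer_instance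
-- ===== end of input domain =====

-- B replaces A's O(count) accumulation loop by the closed-form triangular sum (O(1)).
-- ===== PORT A =====
def solution (price : Int) (money : Int) (count : Int) : Int :=
  -- answer = 0; a = price; for i in range(count): answer += price; price += a
  let st := (PySem.List.pyRange 0 count 1).foldl
    (fun (s : Int × Int) (_ : Int) => (s.1 + s.2, s.2 + price)) (0, price)
  if money > st.1 then 0 else st.1 - money

-- ===== PORT B =====
def solution_alt (price : Int) (money : Int) (count : Int) : Int :=
  let n : Int := if count > 0 then count else 0
  let total := PySem.Int.floordiv (price * n * (n + 1)) 2
  max (total - money) 0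

-- ===== PRECONDITION & SPEC =====
def Spec_solution (price : Int) (money : Int) (count : Int) (out : Int) : Prop := out = solution_alt price money count
instance (price : Int) (money : Int) (count : Int) (out : Int) : Decidable (Spec_solution price money count out) := by unfold Spec_solution; infer_instance

-- ===== CLAIM (what is proved, stated in full; the proofs are below) =====
def Claim_equal_solution : Prop := ∀ (price : Int) (money : Int) (count : Int), Dom_solution price money count → Spec_solution price money count (solution price money count)

-- ===== LEMMAS AND PROOFS =====

-- loop invariant, stated multiplied by 2 to avoid division:
lemma loop_eval (a : Int) (l : List Int) (ans p : Int) :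
    2 * (l.foldl (fun (s : Int × Int) (_ : Int) => (s.1 + s.2, s.2 + a)) (ans, p)).1
        = 2 * ans + 2 * (l.length : Int) * p + a * ((l.length : Int) - 1) * (l.length : Int)
    ∧ (l.foldl (fun (s : Int × Int) (_ : Int) => (s.1 + s.2, s.2 + a)) (ans, p)).2
        = p + (l.length : Int) * a := by
  induction l generalizing ans p with
  | nil => simp
  | cons x xs ih =>
      simp only [List.foldl_cons, List.length_cons]
      obtain ⟨h1, h2⟩ := ih (ans + p) (p + a)
      push_cast
      constructor
      · rw [h1]; ring
      · rw [h2]; ring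

-- ===== VERDICT (by name: the statement is the Claim_ definition above) =====
theorem solution_spec : Claim_equal_solution := by
  intro price money count _
  unfold Spec_solution solution solution_alt
  obtain ⟨h1, _⟩ := loop_eval price (PySem.List.pyRange 0 count 1) 0 price
  simp only [PySem.List.length_pyRange_one, Int.sub_zero] at h1
  set st := ((PySem.List.pyRange 0 count 1).foldl
      (fun (s : Int × Int) (_ : Int) => (s.1 + s.2, s.2 + price)) (0, price)) with hst
  have hn : ((count.toNat : Nat) : Int) = if count > 0 then count else 0 := by
    split <;> omega
  rw [hn] at h1
  set n : Int := if count > 0 then count else 0 with hdefn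
  have h2 : 2 * st.1 = price * n * (n + 1) := by rw [h1]; ring
  have hfd : PySem.Int.floordiv (price * n * (n + 1)) 2 = st.1 := by
    rw [PySem.Int.floordiv_eq_ediv_of_pos (by omega)]
    omega
  simp only [hfd]
  omega
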